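-- pv_equiv track=rewrite | github.com/killerducky/leela-zero | scripts/custom_networks/test.py | ladderseq
-- ===== SOURCE A (Python) =====
-- def ladderseq(start, ladder_length):
--     pattern = [[0,1],[1,-1],[1,0],[-1,1]]
--     x = ord(start[0])
--     y = int(start[1])
--     seq = [start]
--     while ladder_length>0:
--         for p in pattern:
--             x += p[0]
--             y += p[1]
--             sgflet = chr(x)
--             if sgflet >= "i": sgflet = chr(x+1)
--             seq += [sgflet+str(y)]
--             ladder_length -= 1
--             if ladder_length==0: break
--     return seq
-- ===== SOURCE B (Python) =====
-- def ladderseq(start, ladder_length):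
--     # closed-form per-step coordinates instead of running x/y state
--     partialX = [0, 1, 2, 1]
--     partialY = [1, 0, 0, 1]
--     x0 = ord(start[0])
--     y0 = int(start[1])
--     seq = [start]
--     for n in range(ladder_length):
--         q, r = divmod(n, 4)
--         x = x0 + q + partialX[r]
--         y = y0 + q + partialY[r]
--         if chr(x) >= "i":
--             x += 1
--         seq.append(chr(x) + str(y))
--     return seq
-- ===== Notes on version B (the rewrite author's own statement) =====
-- stated objective: alternative
-- what changed: B replaces A's stateful while/for loop with running x,y and a mid-cycle break by a single pass over range(ladder_length) that computes each move's coordinates in closed form from its index via precomputed prefix-offset tables.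
import Mathlib
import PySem

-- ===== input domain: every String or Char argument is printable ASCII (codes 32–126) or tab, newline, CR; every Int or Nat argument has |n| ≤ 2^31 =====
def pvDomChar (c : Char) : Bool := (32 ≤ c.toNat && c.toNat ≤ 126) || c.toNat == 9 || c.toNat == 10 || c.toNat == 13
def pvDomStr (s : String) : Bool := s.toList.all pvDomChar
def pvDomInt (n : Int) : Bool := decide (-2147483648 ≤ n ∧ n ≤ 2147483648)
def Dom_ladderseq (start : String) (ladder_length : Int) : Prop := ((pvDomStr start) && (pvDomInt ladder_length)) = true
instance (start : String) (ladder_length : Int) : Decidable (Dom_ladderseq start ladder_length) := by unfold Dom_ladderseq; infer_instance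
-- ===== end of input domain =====

-- B computes each ladder move in closed form from its index (prefix-offset tables) instead of A's running x/y state with a mid-cycle break; alternative decomposition, same cost.


-- ===== PORT A =====
-- inner 'for p in pattern' loop with the 'if ladder_length==0: break'
def ladderseqForA : List (Int × Int) → Int → Int → Int → List String → Int × Int × Int × List String
  | [], x, y, ll, seq => (x, y, ll, seq)
  | p :: ps, x, y, ll, seq =>
    let x := x + p.1
    let y := y + p.2
    let sgflet := Char.ofNat x.toNat                                   -- chr(x)
    let sgflet := if sgflet ≥ 'i' then Char.ofNat (x + 1).toNat else sgflet
    let seq := seq ++ [String.ofList [sgflet] ++ PySem.Int.toStr y]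
    let ll := ll - 1
    if ll = 0 then (x, y, ll, seq) else ladderseqForA ps x y ll seq

-- outer 'while ladder_length>0' loop; each pass strictly decreases ladder_length, so ll.toNat is enough fuel
def ladderseqWhileA : Nat → Int → Int → Int → List String → List String
  | 0, _, _, _, seq => seq
  | fuel + 1, x, y, ll, seq =>
    if ll > 0 then
      let r := ladderseqForA [(0, 1), (1, -1), (1, 0), (-1, 1)] x y ll seq
      ladderseqWhileA fuel r.1 r.2.1 r.2.2.1 r.2.2.2
    else seq

def ladderseq (start : String) (ladder_length : Int) : List String :=
  let x : Int := ((PySem.Str.pyGet? start 0).getD ' ').toNat           -- ord(start[0]) (Pre_ rules out IndexError)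
  let y : Int := (PySem.Int.ofStr? (String.ofList [(PySem.Str.pyGet? start 1).getD ' '])).getD 0  -- int(start[1]) (Pre_ rules out ValueError)
  ladderseqWhileA ladder_length.toNat x y ladder_length [start]

-- ===== PORT B =====
def ladderseq_alt (start : String) (ladder_length : Int) : List String :=
  let partialX : List Int := [0, 1, 2, 1]
  let partialY : List Int := [1, 0, 0, 1]
  let x0 : Int := ((PySem.Str.pyGet? start 0).getD ' ').toNat
  let y0 : Int := (PySem.Int.ofStr? (String.ofList [(PySem.Str.pyGet? start 1).getD ' '])).getD 0
  [start] ++ (PySem.List.pyRange 0 ladder_length 1).map (fun n =>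
    let q := PySem.Int.floordiv n 4
    let r := PySem.Int.mod n 4
    let x := x0 + q + partialX.getD r.toNat 0
    let y := y0 + q + partialY.getD r.toNat 0
    let x := if Char.ofNat x.toNat ≥ 'i' then x + 1 else x
    String.ofList [Char.ofNat x.toNat] ++ PySem.Int.toStr y)

-- ===== PRECONDITION & SPEC =====
-- Pre_ excludes: strings shorter than 2 (IndexError), a non-digit second character (ValueError from int),
-- and ladder lengths so large that some generated column code reaches the surrogate range 0xD800: past
-- 0x10FFFF Python's chr raises ValueError, and in the band 0xD800..0x10FFFF A returns strings with code
-- points Lean's String cannot represent (B's Python is identical to A there).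
def Pre_ladderseq (start : String) (ladder_length : Int) : Prop :=
  2 ≤ start.length ∧ (start.toList.getD 1 ' ').isDigit = true ∧
    (0 < ladder_length →
      (((start.toList.getD 0 ' ').toNat : Int) + (ladder_length - 1) / 4 + 3 < 55296))
instance (start : String) (ladder_length : Int) : Decidable (Pre_ladderseq start ladder_length) := by
  unfold Pre_ladderseq; infer_instance
def pvWitness_ladderseq : String × Int := ("h7", 6)
def Spec_ladderseq (start : String) (ladder_length : Int) (out : List String) : Prop := out = ladderseq_alt start ladder_length
instance (start : String) (ladder_length : Int) (out : List String) : Decidable (Spec_ladderseq start ladder_length out) := by unfold Spec_ladderseq; infer_instance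

-- ===== CLAIM (what is proved, stated in full; the proofs are below) =====
def Claim_equal_ladderseq : Prop := ∀ (start : String) (ladder_length : Int), Dom_ladderseq start ladder_length → Pre_ladderseq start ladder_length → Spec_ladderseq start ladder_length (ladderseq start ladder_length)

-- ===== LEMMAS AND PROOFS =====

-- the closed-form entry for step index n (what B's map body computes at n : Nat)
def pvEnt (x0 y0 : Int) (n : Nat) : String :=
  let q : Int := ((n / 4 : Nat) : Int)
  let x := x0 + q + ([0, 1, 2, 1] : List Int).getD (n % 4) 0
  let y := y0 + q + ([1, 0, 0, 1] : List Int).getD (n % 4) 0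
  let x := if Char.ofNat x.toNat ≥ 'i' then x + 1 else x
  String.ofList [Char.ofNat x.toNat] ++ PySem.Int.toStr y

def pvS (x y : Int) : String :=
  String.ofList [if Char.ofNat x.toNat ≥ 'i' then Char.ofNat (x + 1).toNat else Char.ofNat x.toNat]
    ++ PySem.Int.toStr y

theorem pv_whileA_zero (fuel : Nat) (x y : Int) (seq : List String) :
    ladderseqWhileA fuel x y 0 seq = seq := by
  cases fuel <;> simp [ladderseqWhileA]

theorem pvEnt0 (x0 y0 : Int) (k : Nat) : pvEnt x0 y0 (4 * k) = pvS (x0 + k + 0) (y0 + k + 1) := by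
  simp [pvEnt, pvS, show (4 * k) / 4 = k by omega, show (4 * k) % 4 = 0 by omega, apply_ite (fun z : Int => Char.ofNat z.toNat)]

theorem pvEnt1 (x0 y0 : Int) (k : Nat) : pvEnt x0 y0 (4 * k + 1) = pvS (x0 + k + 1) (y0 + k + 0) := by
  simp [pvEnt, pvS, show (4 * k + 1) / 4 = k by omega, show (4 * k + 1) % 4 = 1 by omega, apply_ite (fun z : Int => Char.ofNat z.toNat)]

theorem pvEnt2 (x0 y0 : Int) (k : Nat) : pvEnt x0 y0 (4 * k + 2) = pvS (x0 + k + 2) (y0 + k + 0) := by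
  simp [pvEnt, pvS, show (4 * k + 2) / 4 = k by omega, show (4 * k + 2) % 4 = 2 by omega, apply_ite (fun z : Int => Char.ofNat z.toNat)]

theorem pvEnt3 (x0 y0 : Int) (k : Nat) : pvEnt x0 y0 (4 * k + 3) = pvS (x0 + k + 1) (y0 + k + 1) := by
  simp [pvEnt, pvS, show (4 * k + 3) / 4 = k by omega, show (4 * k + 3) % 4 = 3 by omega, apply_ite (fun z : Int => Char.ofNat z.toNat)]

theorem pv_whileA_eq (fuel : Nat) : ∀ (x0 y0 : Int) (k : Nat) (ll : Int) (seq : List String),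
    0 < ll → ll.toNat ≤ fuel →
    ladderseqWhileA fuel (x0 + k) (y0 + k) ll seq
      = seq ++ (List.range ll.toNat).map (fun i => pvEnt x0 y0 (4 * k + i)) := by
  induction fuel with
  | zero => intro x0 y0 k ll seq h hf; omega
  | succ fuel ih =>
    intro x0 y0 k ll seq h hf
    rcases (by omega : ll = 1 ∨ ll = 2 ∨ ll = 3 ∨ 4 ≤ ll) with h1 | h2 | h3 | h4
    · subst h1
      simp only [ladderseqWhileA, if_pos h, ladderseqForA]
      norm_num
      rw [pv_whileA_zero]
      simp [pvEnt0, pvS]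
    · subst h2
      simp only [ladderseqWhileA, if_pos h, ladderseqForA]
      norm_num
      rw [pv_whileA_zero]
      simp [List.range_succ, pvEnt0, pvEnt1, pvS]
    · subst h3
      simp only [ladderseqWhileA, if_pos h, ladderseqForA]
      norm_num
      rw [pv_whileA_zero]
      simp [List.range_succ, pvEnt0, pvEnt1, pvEnt2, pvS]
      ring_nf
    · have hc1 : ¬(ll - 1 = 0) := by omega
      have hc2 : ¬(ll - 1 - 1 = 0) := by omega
      have hc3 : ¬(ll - 1 - 1 - 1 = 0) := by omega
      simp only [ladderseqWhileA, if_pos h, ladderseqForA, if_neg hc1, if_neg hc2, if_neg hc3,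
        ite_self]
      rw [show (x0 + ↑k + 0 + 1 + 1 + -1 : ℤ) = x0 + ((k + 1 : Nat) : ℤ) by push_cast; ring,
          show (y0 + ↑k + 1 + -1 + 0 + 1 : ℤ) = y0 + ((k + 1 : Nat) : ℤ) by push_cast; ring,
          show (ll - 1 - 1 - 1 - 1 : ℤ) = ll - 4 by ring]
      rcases (by omega : ll = 4 ∨ 4 < ll) with h5 | h5
      · subst h5
        norm_num
        rw [pv_whileA_zero]
        simp [List.range_succ, pvEnt0, pvEnt1, pvEnt2, pvEnt3, pvS]
        ring_nf
        exact ⟨trivial, trivial⟩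
      · rw [ih x0 y0 (k + 1) (ll - 4) _ (by omega) (by omega)]
        rw [show ll.toNat = 4 + (ll - 4).toNat by omega, List.range_add]
        have hidx : ∀ i : Nat, 4 * k + (4 + i) = 4 * (k + 1) + i := by omega
        simp [List.range_succ, pvEnt0, pvEnt1, pvEnt2, pvEnt3, pvS, hidx]
        ring_nf
        exact ⟨trivial, trivial⟩

-- ===== VERDICT (by name: the statement is the Claim_ definition above) =====
theorem ladderseq_spec : Claim_equal_ladderseq := by
  intro start ll _ _
  unfold Spec_ladderseq
  show ladderseq start ll = ladderseq_alt start ll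
  simp only [ladderseq, ladderseq_alt]
  generalize ((((PySem.Str.pyGet? start 0).getD ' ').toNat : Int)) = X
  generalize ((PySem.Int.ofStr? (String.ofList [(PySem.Str.pyGet? start 1).getD ' '])).getD 0) = Y
  by_cases hll : 0 < ll
  · have h := pv_whileA_eq ll.toNat X Y 0 ll [start] hll le_rfl
    simp only [Nat.cast_zero, add_zero, Nat.mul_zero, zero_add] at h
    rw [h, PySem.List.pyRange_one]
    simp [pvEnt, List.map_map, Function.comp_def]
    intro a ha
    rw [show ((a : Int) % 4).toNat = a % 4 by omega]
  · rw [show ll.toNat = 0 by omega, PySem.List.pyRange_one_eq_nil (by omega)]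
    simp [ladderseqWhileA]
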